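-- pv_equiv track=rewrite | github.com/Adithya-Bhagavath/RAG-Smart-Search | src/crawler.py | rank_text_by_query
-- ===== SOURCE A (Python) =====
-- def rank_text_by_query(text, query):
--     """Ranks text chunks based on keyword overlap with query."""
--     if not query:
--         return text
--     paragraphs = [p.strip() for p in text.split(".") if len(p.split()) > 6]
--     query_words = set(query.lower().split())
--     ranked = sorted(
--         paragraphs,
--         key=lambda p: len(set(p.lower().split()) & query_words),
--         reverse=True,
--     )
--     return ". ".join(ranked[:6])  # top 6 relevant sections
-- ===== SOURCE B (Python) =====
-- def rank_text_by_query(text, query):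
--     """Ranks text chunks based on keyword overlap with query."""
--     if not query:
--         return text
--     query_words = set(query.lower().split())
--     # one pass: filter, strip and score each candidate paragraph
--     scored = []
--     for part in text.split("."):
--         if len(part.split()) > 6:
--             p = part.strip()
--             scored.append((len(set(p.lower().split()) & query_words), p))
--     # collect paragraphs score by score, highest first, stopping at 6
--     out = []
--     s = len(query_words)
--     while s >= 0 and len(out) < 6:
--         for sc, p in scored:
--             if sc == s:
--                 out.append(p)
--                 if len(out) == 6:
--                     break
--         s -= 1
--     return ". ".join(out)
-- ===== Notes on version B (the rewrite author's own statement) =====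
-- stated objective: alternative
-- what changed: Replaces the list-comprehension pipeline plus stable reverse comparison sort by a single explicit pass that filters, strips and scores each paragraph, followed by a counting-style collection loop that walks scores from len(query_words) down to 0 and stops as soon as 6 paragraphs are gathered; stability within equal scores matches Python's stable reverse sort.
import Mathlib
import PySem

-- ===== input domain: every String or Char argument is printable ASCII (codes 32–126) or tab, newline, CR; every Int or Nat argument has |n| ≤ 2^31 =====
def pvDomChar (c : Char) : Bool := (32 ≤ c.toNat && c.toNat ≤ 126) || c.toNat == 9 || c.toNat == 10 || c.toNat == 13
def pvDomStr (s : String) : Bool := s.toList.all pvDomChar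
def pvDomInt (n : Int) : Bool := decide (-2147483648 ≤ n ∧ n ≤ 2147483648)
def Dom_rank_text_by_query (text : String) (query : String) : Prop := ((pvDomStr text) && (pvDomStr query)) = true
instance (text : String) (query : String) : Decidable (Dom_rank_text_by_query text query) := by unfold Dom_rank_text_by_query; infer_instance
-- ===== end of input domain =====

-- B replaces the comprehension pipeline + stable reverse comparison sort by one explicit
-- filter/strip/score pass and a counting-style collection loop over scores k..0 that stops
-- at 6 results (objective: alternative).

-- ===== PORT A =====
-- 'text.split(".")' : split? is 'some' for the nonempty separator "."; '.getD []' is exact here.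
def rank_text_by_query (text : String) (query : String) : String :=
  if query = "" then text
  else
    let paragraphs :=
      (((PySem.Str.split? text ".").getD []).filter
        (fun p => 6 < (PySem.Str.split₀ p).length)).map PySem.Str.strip
    let query_words := PySem.Set.ofList (PySem.Str.split₀ (PySem.Str.lower query))
    let ranked := PySem.List.sorted paragraphs
      (fun p => PySem.Set.len (PySem.Set.inter
        (PySem.Set.ofList (PySem.Str.split₀ (PySem.Str.lower p))) query_words)) true
    PySem.Str.join ". " (PySem.List.slice ranked none (some 6))

-- ===== PORT B =====
-- the 'for part in text.split("."):' pass of Source B: filter, strip and score in one sweep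
def pvScorePass (qw : PySem.Set String) : List String → List (Int × String)
  | [] => []
  | part :: rest =>
    if 6 < (PySem.Str.split₀ part).length then
      (PySem.Set.len (PySem.Set.inter
        (PySem.Set.ofList (PySem.Str.split₀ (PySem.Str.lower (PySem.Str.strip part)))) qw),
       PySem.Str.strip part) :: pvScorePass qw rest
    else pvScorePass qw rest

-- the inner 'for sc, p in scored:' loop at one score (breaks when 6 gathered)
def pvCollectBucket (scored : List (Int × String)) (s : Int) (acc : List String) : List String :=
  match scored with
  | [] => acc
  | (sc, p) :: rest =>
    if sc == s then
      if (acc ++ [p]).length == 6 then acc ++ [p]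
      else pvCollectBucket rest s (acc ++ [p])
    else pvCollectBucket rest s acc

-- the outer 'while s >= 0 and len(out) < 6:' countdown over scores
def pvCollect (scored : List (Int × String)) : Nat → List String → List String
  | j, acc =>
    if acc.length < 6 then
      match j with
      | 0 => pvCollectBucket scored 0 acc
      | j + 1 => pvCollect scored j (pvCollectBucket scored ((j : Int) + 1) acc)
    else acc

def rank_text_by_query_alt (text : String) (query : String) : String :=
  if query = "" then text
  else
    let qw := PySem.Set.ofList (PySem.Str.split₀ (PySem.Str.lower query))
    PySem.Str.join ". "
      (pvCollect (pvScorePass qw ((PySem.Str.split? text ".").getD []))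
        (PySem.Set.len qw).toNat [])

-- ===== PRECONDITION & SPEC =====
def Spec_rank_text_by_query (text : String) (query : String) (out : String) : Prop := out = rank_text_by_query_alt text query
instance (text : String) (query : String) (out : String) : Decidable (Spec_rank_text_by_query text query out) := by unfold Spec_rank_text_by_query; infer_instance

-- ===== CLAIM (what is proved, stated in full; the proofs are below) =====
def Claim_equal_rank_text_by_query : Prop := ∀ (text : String) (query : String), Dom_rank_text_by_query text query → Spec_rank_text_by_query text query (rank_text_by_query text query)

-- ===== LEMMAS AND PROOFS =====
-- paragraphs grouped by key, scores n down to 0 (over the paragraph list directly)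
def pvBuckets {α : Type} (key : α → ℤ) (n : ℕ) (xs : List α) : List α :=
  ((List.range (n+1)).map (fun (j : ℕ) => (n:ℤ) - (j:ℤ))).flatMap (fun s => xs.filter (fun y => key y == s))

-- the same grouping over scored pairs (the shape B's loop produces)
def pvDesc (scored : List (Int × String)) (n : ℕ) : List String :=
  ((List.range (n+1)).map (fun (j : ℕ) => (n:ℤ) - (j:ℤ))).flatMap
    (fun s => (scored.filter (fun q => q.1 == s)).map (fun q => q.2))

lemma pvBuckets_succ {α : Type} (key : α → ℤ) (n : ℕ) (xs : List α) :
    pvBuckets key (n+1) xs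
      = xs.filter (fun y => key y == ((n:ℤ)+1)) ++ pvBuckets key n xs := by
  unfold pvBuckets
  rw [List.range_succ_eq_map]
  simp only [List.map_cons, List.flatMap_cons, List.map_map]
  have hmap : List.map ((fun (j:ℕ) => ((n:ℤ)+1) - (j:ℤ)) ∘ Nat.succ) (List.range (n+1))
      = List.map (fun (j:ℕ) => (n:ℤ) - (j:ℤ)) (List.range (n+1)) := by
    apply List.map_congr_left
    intro a _
    simp only [Function.comp_apply]
    push_cast
    ring
  push_cast
  rw [hmap]
  norm_num

lemma pvMem_buckets_key_le {α : Type} (key : α → ℤ) (n : ℕ) (xs : List α) (y : α)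
    (hy : y ∈ pvBuckets key n xs) : key y ≤ (n:ℤ) := by
  unfold pvBuckets at hy
  simp only [List.mem_flatMap, List.mem_map, List.mem_range, List.mem_filter, beq_iff_eq] at hy
  obtain ⟨s, ⟨j, hj, rfl⟩, _, hk⟩ := hy
  omega

lemma pvBuckets_append_high {α : Type} (key : α → ℤ) (n : ℕ) (xs : List α) (x : α)
    (h : (n:ℤ) < key x) :
    pvBuckets key n (xs ++ [x]) = pvBuckets key n xs := by
  unfold pvBuckets
  rw [List.flatMap, List.flatMap]
  congr 1
  apply List.map_congr_left
  intro s hs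
  simp only [List.mem_map, List.mem_range] at hs
  obtain ⟨j, hj, rfl⟩ := hs
  rw [List.filter_append]
  have : List.filter (fun y => key y == ((n:ℤ) - (j:ℤ))) [x] = [] := by
    simp only [List.filter_cons, List.filter_nil]
    rw [if_neg]
    simp only [beq_iff_eq]
    omega
  rw [this, List.append_nil]

lemma pvInsertBy_append_left {α : Type} (bef : α → α → Bool) (x : α) (ys zs : List α)
    (h : ∀ y ∈ ys, bef x y = false) :
    PySem.List.insertBy bef x (ys ++ zs) = ys ++ PySem.List.insertBy bef x zs := by
  induction ys with
  | nil => simp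
  | cons y ys ih =>
    have hy := h y (by simp)
    have ht := ih (fun a ha => h a (by simp [ha]))
    simp [PySem.List.insertBy, hy, ht]

lemma pvInsertBy_all_before {α : Type} (bef : α → α → Bool) (x : α) (zs : List α)
    (h : ∀ y ∈ zs, bef x y = true) :
    PySem.List.insertBy bef x zs = x :: zs := by
  cases zs with
  | nil => rfl
  | cons z zs => simp [PySem.List.insertBy, h z (by simp)]

lemma pvBuckets_zero {α : Type} (key : α → ℤ) (xs : List α) :
    pvBuckets key 0 xs = xs.filter (fun y => key y == (0:ℤ)) := by
  simp [pvBuckets]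

lemma pvMem_filter_key {α : Type} (key : α → ℤ) (c : ℤ) (xs : List α) (y : α)
    (hy : y ∈ xs.filter (fun y => key y == c)) : key y = c := by
  simp only [List.mem_filter, beq_iff_eq] at hy
  exact hy.2

lemma pvInsert_buckets {α : Type} (key : α → ℤ) (n : ℕ) (xs : List α) (x : α)
    (h0 : 0 ≤ key x) (hn : key x ≤ (n:ℤ)) :
    PySem.List.insertBy (fun a b => decide (key b < key a)) x (pvBuckets key n xs)
      = pvBuckets key n (xs ++ [x]) := by
  induction n generalizing xs with
  | zero =>
    have hx : key x = 0 := by omega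
    rw [pvBuckets_zero, pvBuckets_zero]
    rw [PySem.List.insertBy_of_forall_not_before]
    · rw [List.filter_append]
      simp [hx]
    · intro y hy
      have := pvMem_filter_key key 0 xs y hy
      simp [this, hx]
  | succ n ih =>
    rw [pvBuckets_succ, pvBuckets_succ]
    by_cases hx : key x = (n:ℤ) + 1
    · rw [pvInsertBy_append_left _ _ _ _ (by
        intro y hy
        have := pvMem_filter_key key ((n:ℤ)+1) xs y hy
        simp [this, hx])]
      rw [pvInsertBy_all_before _ _ _ (by
        intro y hy
        have := pvMem_buckets_key_le key n xs y hy
        simp only [decide_eq_true_eq]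
        omega)]
      rw [pvBuckets_append_high key n xs x (by omega)]
      rw [List.filter_append]
      simp [hx]
    · have hxle : key x ≤ (n:ℤ) := by omega
      rw [pvInsertBy_append_left _ _ _ _ (by
        intro y hy
        have := pvMem_filter_key key ((n:ℤ)+1) xs y hy
        simp only [decide_eq_false_iff_not]
        omega)]
      rw [ih xs hxle]
      rw [List.filter_append]
      simp [hx]

lemma pvSorted_rev_eq_buckets {α : Type} (key : α → ℤ) (n : ℕ) (xs : List α)
    (hb : ∀ x ∈ xs, 0 ≤ key x ∧ key x ≤ (n:ℤ)) :
    PySem.List.sorted xs key true = pvBuckets key n xs := by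
  rw [PySem.List.sorted_rev_eq_foldl_insertBy]
  induction xs using List.reverseRecOn with
  | nil => simp [pvBuckets]
  | append_singleton xs x ih =>
    rw [List.foldl_append]
    simp only [List.foldl_cons, List.foldl_nil]
    rw [ih (fun a ha => hb a (by simp [ha]))]
    exact pvInsert_buckets key n xs x (hb x (by simp)).1 (hb x (by simp)).2

-- B's score pass produces exactly A's (filter, map strip) paragraphs paired with their keys
lemma pvScorePass_eq (qw : PySem.Set String) (parts : List String) :
    pvScorePass qw parts
      = ((parts.filter (fun p => 6 < (PySem.Str.split₀ p).length)).map PySem.Str.strip).map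
          (fun p => (PySem.Set.len (PySem.Set.inter
            (PySem.Set.ofList (PySem.Str.split₀ (PySem.Str.lower p))) qw), p)) := by
  induction parts with
  | nil => rfl
  | cons part rest ih =>
    rw [show pvScorePass qw (part :: rest)
          = if 6 < (PySem.Str.split₀ part).length then
              (PySem.Set.len (PySem.Set.inter
                (PySem.Set.ofList (PySem.Str.split₀ (PySem.Str.lower (PySem.Str.strip part)))) qw),
               PySem.Str.strip part) :: pvScorePass qw rest
            else pvScorePass qw rest from rfl,
        ih, List.filter_cons]
    by_cases h : 6 < (PySem.Str.split₀ part).length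
    · rw [if_pos h, if_pos (by simpa using h), List.map_cons, List.map_cons]
    · rw [if_neg h, if_neg (by simpa using h)]

lemma pvTake_take_append {α : Type} (n : ℕ) (xs ys : List α) :
    (xs.take n ++ ys).take n = (xs ++ ys).take n := by
  have hmin : n - min n xs.length = n - xs.length := by omega
  rw [List.take_append, List.take_append, List.take_take, List.length_take, min_self, hmin]

lemma pvCollectBucket_eq (scored : List (Int × String)) (s : Int) (acc : List String)
    (h : acc.length < 6) :
    pvCollectBucket scored s acc
      = (acc ++ (scored.filter (fun q => q.1 == s)).map (fun q => q.2)).take 6 := by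
  induction scored generalizing acc with
  | nil =>
    simp [pvCollectBucket, List.take_of_length_le (by omega : acc.length ≤ 6)]
  | cons q rest ih =>
    obtain ⟨sc, p⟩ := q
    by_cases hsc : sc = s
    · by_cases hlen : (acc ++ [p]).length = 6
      · have hfull : ((acc ++ [p]) ++ ((rest.filter (fun q => q.1 == s)).map (fun q => q.2))).take 6
            = acc ++ [p] := by
          rw [List.take_append, List.take_of_length_le (by omega), hlen]
          simp
        simp only [pvCollectBucket, hsc, beq_self_eq_true, if_pos, hlen, beq_self_eq_true]
        simp only [List.filter_cons, beq_self_eq_true, if_pos, List.map_cons]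
        conv_rhs => rw [List.append_cons]
        exact hfull.symm
      · have hlt : (acc ++ [p]).length < 6 := by
          simp only [List.length_append, List.length_cons, List.length_nil] at hlen ⊢
          omega
        simp only [pvCollectBucket, hsc, beq_self_eq_true, if_pos]
        rw [if_neg (by simpa using hlen)]
        rw [ih _ hlt]
        simp only [List.filter_cons, beq_self_eq_true, if_pos, List.map_cons]
        congr 1
        simp
    · simp only [pvCollectBucket]
      rw [if_neg (by simpa using hsc), ih _ h]
      simp [hsc]

lemma pvDesc_zero (scored : List (Int × String)) :
    pvDesc scored 0 = (scored.filter (fun q => q.1 == (0:ℤ))).map (fun q => q.2) := by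
  simp [pvDesc]

lemma pvDesc_succ (scored : List (Int × String)) (n : ℕ) :
    pvDesc scored (n+1)
      = (scored.filter (fun q => q.1 == ((n:ℤ)+1))).map (fun q => q.2) ++ pvDesc scored n := by
  unfold pvDesc
  rw [List.range_succ_eq_map]
  simp only [List.map_cons, List.flatMap_cons, List.map_map]
  have hmap : List.map ((fun (j:ℕ) => ((n:ℤ)+1) - (j:ℤ)) ∘ Nat.succ) (List.range (n+1))
      = List.map (fun (j:ℕ) => (n:ℤ) - (j:ℤ)) (List.range (n+1)) := by
    apply List.map_congr_left
    intro a _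
    simp only [Function.comp_apply]
    push_cast
    ring
  push_cast
  rw [hmap]
  norm_num

lemma pvCollect_eq (scored : List (Int × String)) (j : ℕ) (acc : List String)
    (h : acc.length ≤ 6) :
    pvCollect scored j acc = (acc ++ pvDesc scored j).take 6 := by
  induction j generalizing acc with
  | zero =>
    by_cases hlt : acc.length < 6
    · rw [pvCollect, if_pos hlt]
      rw [pvCollectBucket_eq _ _ _ hlt, pvDesc_zero]
    · have h6 : acc.length = 6 := by omega
      rw [pvCollect, if_neg hlt]
      rw [List.take_append, List.take_of_length_le (by omega), h6]
      simp
  | succ j ih =>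
    by_cases hlt : acc.length < 6
    · rw [pvCollect, if_pos hlt]
      rw [pvCollectBucket_eq _ _ _ hlt]
      rw [ih _ (by simp)]
      rw [pvDesc_succ, pvTake_take_append]
      simp [List.append_assoc]
    · have h6 : acc.length = 6 := by omega
      rw [pvCollect, if_neg hlt]
      rw [List.take_append, List.take_of_length_le (by omega), h6]
      simp

-- descending buckets over scored pairs = descending buckets over the paragraphs directly
lemma pvDesc_map (ps : List String) (key : String → ℤ) (n : ℕ) :
    pvDesc (ps.map (fun p => (key p, p))) n = pvBuckets key n ps := by
  unfold pvDesc pvBuckets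
  rw [List.flatMap, List.flatMap]
  congr 1
  apply List.map_congr_left
  intro s _
  rw [List.filter_map, List.map_map]
  have h1 : ((fun q : Int × String => q.2) ∘ (fun p => (key p, p))) = id := rfl
  have h2 : ((fun q : Int × String => q.1 == s) ∘ (fun p => (key p, p))) = (fun y => key y == s) := rfl
  rw [h1, h2, List.map_id]

lemma pvKey_bounds (qw : PySem.Set String) (p : String) :
    0 ≤ PySem.Set.len (PySem.Set.inter (PySem.Set.ofList (PySem.Str.split₀ (PySem.Str.lower p))) qw)
    ∧ PySem.Set.len (PySem.Set.inter (PySem.Set.ofList (PySem.Str.split₀ (PySem.Str.lower p))) qw)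
        ≤ ((qw.length : ℕ) : ℤ) := by
  constructor
  · exact Int.natCast_nonneg _
  · have hnd : List.Nodup (PySem.Set.inter (PySem.Set.ofList (PySem.Str.split₀ (PySem.Str.lower p))) qw) :=
      PySem.Set.nodup_inter _ _ (PySem.Set.nodup_ofList _)
    have hsub : (PySem.Set.inter (PySem.Set.ofList (PySem.Str.split₀ (PySem.Str.lower p))) qw) ⊆ qw :=
      fun y hy => ((PySem.Set.mem_inter _ _ y).1 hy).2
    exact Int.ofNat_le.mpr (List.Subperm.length_le (List.subperm_of_subset hnd hsub))

lemma pvSlice6 {α : Type} (xs : List α) : PySem.List.slice xs none (some 6) = xs.take 6 := by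
  have h6 : (6:ℤ).toNat = 6 := rfl
  rw [@PySem.List.slice_to α xs 6 (by omega), h6]

-- the whole pipeline equality, for any split parts and query-word set
lemma pvMain (qw : PySem.Set String) (parts : List String) :
    PySem.Str.join ". " (PySem.List.slice (PySem.List.sorted
      ((parts.filter (fun p => 6 < (PySem.Str.split₀ p).length)).map PySem.Str.strip)
      (fun p => PySem.Set.len (PySem.Set.inter
        (PySem.Set.ofList (PySem.Str.split₀ (PySem.Str.lower p))) qw)) true) none (some 6))
    = PySem.Str.join ". " (pvCollect (pvScorePass qw parts) (PySem.Set.len qw).toNat []) := by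
  congr 1
  rw [pvScorePass_eq, pvCollect_eq _ _ _ (by simp), List.nil_append]
  have hk : (PySem.Set.len qw).toNat = qw.length := by
    simp [PySem.Set.len]
  rw [hk, pvDesc_map _ _ qw.length, pvSlice6]
  rw [pvSorted_rev_eq_buckets _ qw.length _ (fun x _ => pvKey_bounds qw x)]

-- ===== VERDICT (by name: the statement is the Claim_ definition above) =====
theorem rank_text_by_query_spec : Claim_equal_rank_text_by_query := by
  intro text query _
  unfold Spec_rank_text_by_query rank_text_by_query rank_text_by_query_alt
  by_cases hq : query = ""
  · simp [hq]
  · rw [if_neg hq, if_neg hq]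
    exact pvMain (PySem.Set.ofList (PySem.Str.split₀ (PySem.Str.lower query)))
      ((PySem.Str.split? text ".").getD [])
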